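-- pv_equiv track=rewrite | github.com/Chariton-kyp/Memgentic | memgentic/memgentic/skills/importer.py | _find_skill_md
-- ===== SOURCE A (Python) =====
-- def _find_skill_md(files: list[str], base_prefix: str) -> str | None:
--     """Return the best SKILL.md candidate within ``files``.
--
--     Prefers a SKILL.md that sits at the base of ``base_prefix`` (or repo root
--     when the base is empty). Falls back to the shallowest match otherwise.
--     """
--     candidates = [p for p in files if p.rsplit("/", 1)[-1].lower() == "skill.md"]
--     if not candidates:
--         return None
--
--     preferred_parent = base_prefix.rstrip("/")
--     for candidate in candidates:
--         parent = candidate.rsplit("/", 1)[0] if "/" in candidate else ""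
--         if parent == preferred_parent:
--             return candidate
--
--     # Fall back to the candidate with the fewest path segments
--     candidates.sort(key=lambda p: p.count("/"))
--     return candidates[0]
-- ===== SOURCE B (Python) =====
-- def _find_skill_md(files: list[str], base_prefix: str) -> str | None:
--     """Single pass: return the first SKILL.md whose parent matches the base,
--     otherwise track the first shallowest match; no candidate list, no sort."""
--     preferred_parent = base_prefix.rstrip("/")
--     best = None
--     best_depth = -1
--     for p in files:
--         head, sep, tail = p.rpartition("/")
--         if tail.lower() != "skill.md":
--             continue
--         if (head if sep else "") == preferred_parent:
--             return p
--         d = p.count("/")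
--         if best is None or d < best_depth:
--             best = p
--             best_depth = d
--     return best
-- ===== Notes on version B (the rewrite author's own statement) =====
-- stated objective: simpler
-- what changed: Replaced A's candidate-list build, separate priority loop and stable sort-then-take-first fallback by a single pass over files that returns the first preferred-parent SKILL.md immediately and otherwise keeps the first shallowest match.
import Mathlib
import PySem

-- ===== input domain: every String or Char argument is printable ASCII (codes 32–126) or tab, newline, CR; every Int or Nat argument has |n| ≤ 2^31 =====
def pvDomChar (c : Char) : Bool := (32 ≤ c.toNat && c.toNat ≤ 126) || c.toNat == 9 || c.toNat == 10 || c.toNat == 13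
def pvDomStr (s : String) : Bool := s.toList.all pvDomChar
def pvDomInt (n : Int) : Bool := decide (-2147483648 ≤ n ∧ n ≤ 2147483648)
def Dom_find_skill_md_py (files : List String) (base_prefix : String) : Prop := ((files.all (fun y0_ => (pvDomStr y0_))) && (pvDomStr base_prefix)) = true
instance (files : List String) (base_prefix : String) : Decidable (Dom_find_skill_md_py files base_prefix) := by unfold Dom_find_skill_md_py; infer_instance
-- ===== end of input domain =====

-- B replaces A's candidate list + priority loop + stable sort by ONE pass that early-returns
-- the first preferred-parent match and otherwise tracks the first shallowest match (objective: simpler).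

-- Shared string helpers (both Pythons compute these same values, A via rsplit("/",1), B via rpartition("/")):
-- p.rsplit("/", 1)[-1]  =  p.rpartition("/")[2]  = the part after the last '/' (whole string if none) — exact
def pvTailName (p : String) : String :=
  String.ofList ((p.toList.reverse.takeWhile (fun c => !(c == '/'))).reverse)
-- p.rsplit("/", 1)[0] if "/" in p else ""  =  p.rpartition("/")[0] if sep else ""  — exact
def pvParent (p : String) : String :=
  if PySem.Str.isIn "/" p then
    String.ofList (((p.toList.reverse.dropWhile (fun c => !(c == '/'))).drop 1).reverse)
  else ""
-- base_prefix.rstrip("/") : drop trailing '/' characters — exact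
def pvRstripSlash (s : String) : String :=
  String.ofList ((s.toList.reverse.dropWhile (fun c => c == '/')).reverse)
-- p.count("/") as a Python int
def pvKey (p : String) : Int := (PySem.Str.count p "/" : Int)

-- ===== PORT A =====
-- the 'for candidate in candidates: if parent == preferred_parent: return candidate' loop
def pvLoopA (pref : String) : List String → Option String
  | [] => none
  | c :: rest => if pvParent c == pref then some c else pvLoopA pref rest

def find_skill_md_py (files : List String) (base_prefix : String) : Option String :=
  let candidates := files.filter (fun p => PySem.Str.lower (pvTailName p) == "skill.md")
  if candidates.isEmpty then none
  else
    let preferred_parent := pvRstripSlash base_prefix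
    match pvLoopA preferred_parent candidates with
    | some c => some c
    | none =>
      -- candidates.sort(key=lambda p: p.count("/")); return candidates[0]  (list nonempty here)
      (PySem.List.sorted candidates pvKey false).head?

-- ===== PORT B =====
-- the single 'for p in files' pass of Source B
def pvLoopB (pref : String) : List String → Option String → Int → Option String
  | [], best, _ => best
  | p :: rest, best, bestDepth =>
    if PySem.Str.lower (pvTailName p) == "skill.md" then
      if pvParent p == pref then some p
      else
        let d := pvKey p
        if best.isNone || d < bestDepth then pvLoopB pref rest (some p) d
        else pvLoopB pref rest best bestDepth
    else pvLoopB pref rest best bestDepth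

def find_skill_md_py_alt (files : List String) (base_prefix : String) : Option String :=
  pvLoopB (pvRstripSlash base_prefix) files none (-1)

-- ===== PRECONDITION & SPEC =====
def Spec_find_skill_md_py (files : List String) (base_prefix : String) (out : Option String) : Prop := out = find_skill_md_py_alt files base_prefix
instance (files : List String) (base_prefix : String) (out : Option String) : Decidable (Spec_find_skill_md_py files base_prefix out) := by unfold Spec_find_skill_md_py; infer_instance

-- ===== CLAIM (what is proved, stated in full; the proofs are below) =====
def Claim_equal_find_skill_md_py : Prop := ∀ (files : List String) (base_prefix : String), Dom_find_skill_md_py files base_prefix → Spec_find_skill_md_py files base_prefix (find_skill_md_py files base_prefix)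

-- ===== LEMMAS AND PROOFS =====

-- 'first element with minimal pvKey so far', the fold min? performs
def pvStep (acc : Option String) (x : String) : Option String :=
  match acc with
  | none => some x
  | some m => if pvKey x < pvKey m then some x else some m

theorem pvInsertBy_head (x : String) (ys : List String) :
    (PySem.List.insertBy (fun a b => decide (pvKey a < pvKey b)) x ys).head? = pvStep ys.head? x := by
  cases ys with
  | nil => rfl
  | cons y t =>
    by_cases h : pvKey x < pvKey y
    · simp [PySem.List.insertBy, pvStep, h]
    · simp [PySem.List.insertBy, pvStep, h]

theorem pvFoldl_ins_head (xs : List String) : ∀ acc : List String,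
    (xs.foldl (fun acc x => PySem.List.insertBy (fun a b => decide (pvKey a < pvKey b)) x acc) acc).head?
      = xs.foldl pvStep acc.head? := by
  induction xs with
  | nil => intro acc; rfl
  | cons x rest ih =>
    intro acc
    simp only [List.foldl_cons]
    rw [ih, pvInsertBy_head]

theorem pvSorted_head (cands : List String) :
    (PySem.List.sorted cands pvKey false).head? = cands.foldl pvStep none := by
  rw [PySem.List.sorted_eq_foldl_insertBy]
  exact pvFoldl_ins_head cands []

-- the single pass = priority search over the filtered list, else the running first-min fold
theorem pvLoopB_eq (pref : String) : ∀ (files : List String) (b : Option String) (bd : Int),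
    (∀ s, b = some s → bd = pvKey s) →
    pvLoopB pref files b bd =
      (match pvLoopA pref (files.filter (fun p => PySem.Str.lower (pvTailName p) == "skill.md")) with
       | some c => some c
       | none => (files.filter (fun p => PySem.Str.lower (pvTailName p) == "skill.md")).foldl pvStep b) := by
  intro files
  induction files with
  | nil => intro b bd _; rfl
  | cons p rest ih =>
    intro b bd hb
    by_cases hc : (PySem.Str.lower (pvTailName p) == "skill.md") = true
    · by_cases hm : (pvParent p == pref) = true
      · simp [pvLoopB, pvLoopA, hc, hm]
      · cases b with
        | none =>
          simp only [pvLoopB, pvLoopA, hc, hm, List.filter_cons,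
            Option.isNone_none, Bool.true_or, if_true, Bool.false_eq_true, if_false]
          rw [ih (some p) (pvKey p) (by intro s hs; cases hs; rfl)]
          simp [pvStep]
        | some m =>
          have hbd : bd = pvKey m := hb m rfl
          by_cases hlt : pvKey p < pvKey m
          · have h1 : pvLoopB pref (p :: rest) (some m) bd = pvLoopB pref rest (some p) (pvKey p) := by
              simp [pvLoopB, hc, hm, hbd, hlt]
            rw [h1, ih (some p) (pvKey p) (by intro s hs; cases hs; rfl)]
            simp [hc, pvLoopA, hm, pvStep, hlt]
          · have h1 : pvLoopB pref (p :: rest) (some m) bd = pvLoopB pref rest (some m) bd := by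
              simp [pvLoopB, hc, hm, hbd, hlt]
            rw [h1, ih (some m) bd hb]
            simp [hc, pvLoopA, hm, pvStep, hlt]
    · simp only [pvLoopB, hc, Bool.false_eq_true, if_false, List.filter_cons]
      exact ih b bd hb

-- ===== VERDICT (by name: the statement is the Claim_ definition above) =====
theorem find_skill_md_py_spec : Claim_equal_find_skill_md_py := by
  intro files base_prefix _
  unfold Spec_find_skill_md_py find_skill_md_py find_skill_md_py_alt
  rw [pvLoopB_eq (pvRstripSlash base_prefix) files none (-1) (by intro s hs; cases hs)]
  set cands := files.filter (fun p => PySem.Str.lower (pvTailName p) == "skill.md") with hcands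
  cases hE : cands with
  | nil => simp [pvLoopA]
  | cons c t =>
    simp only [List.isEmpty_cons, Bool.false_eq_true, if_false]
    cases hA : pvLoopA (pvRstripSlash base_prefix) (c :: t) with
    | some x => simp
    | none => simpa using pvSorted_head (c :: t)
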